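-- pv_equiv track=rewrite | github.com/Vineyardcode/voynich_slop | scripts/phase51_attack_synthesis.py | to_glyphs
-- ===== SOURCE A (Python) =====
-- GLYPH_MAP = [
--     # Order matters: longest first
--     ('cth', 'G1'), ('ckh', 'G2'), ('cph', 'G3'), ('cfh', 'G4'),
--     ('tch', 'G5'), ('kch', 'G6'), ('pch', 'G7'), ('fch', 'G8'),
--     ('tsh', 'G9'), ('ksh', 'GA'), ('psh', 'GB'), ('fsh', 'GC'),
--     ('ch', 'C'), ('sh', 'S'),
--     ('ii', 'I'),  # ii is probably a single glyph (connected)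
--     ('ee', 'E'),  # ee might be a single glyph
--     ('ai', 'A'),  # ain-like combination
-- ]
--
-- def to_glyphs(w):
--     """Convert EVA word to glyph sequence"""
--     result = []
--     i = 0
--     while i < len(w):
--         matched = False
--         for eva, glyph in GLYPH_MAP:
--             if w[i:i+len(eva)] == eva:
--                 result.append(glyph)
--                 i += len(eva)
--                 matched = True
--                 break
--         if not matched:
--             result.append(w[i])
--             i += 1
--     return result
-- ===== SOURCE B (Python) =====
-- TKPF = 'tkpf'
-- HEX = '123456789ABC'
--
--
-- def to_glyphs(w):
--     """Convert EVA word to glyph sequence"""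
--     out = []
--     i, n = 0, len(w)
--     while i < n:
--         a = w[i]
--         b = w[i + 1] if i + 1 < n else ''
--         if i + 2 < n and w[i + 2] == 'h' and a == 'c' and b in TKPF:
--             # c{t,k,p,f}h -> G1..G4, computed from b's rank
--             out.append('G' + HEX[TKPF.index(b)])
--             i += 3
--         elif i + 2 < n and w[i + 2] == 'h' and a in TKPF and (b == 'c' or b == 's'):
--             # {t,k,p,f}ch -> G5..G8, {t,k,p,f}sh -> G9..GC
--             out.append('G' + HEX[TKPF.index(a) + (4 if b == 'c' else 8)])
--             i += 3
--         elif (a == b and a in 'ie') or ((a == 'c' or a == 's') and b == 'h') or (a == 'a' and b == 'i'):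
--             # bigraph glyph is the uppercase of its distinguishing first char
--             out.append(a.upper())
--             i += 2
--         else:
--             out.append(a)
--             i += 1
--     return out
-- ===== Notes on version B (the rewrite author's own statement) =====
-- stated objective: faster
-- what changed: B discards the GLYPH_MAP table and per-position pattern scan entirely: it classifies trigraphs by their structural shape (c+{t,k,p,f}+h or {t,k,p,f}+{c,s}+h) and computes each glyph name arithmetically from the character's rank ('G' + HEX[rank]); bigraph glyphs are computed as the uppercase of the distinguishing first character.
import Mathlib
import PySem

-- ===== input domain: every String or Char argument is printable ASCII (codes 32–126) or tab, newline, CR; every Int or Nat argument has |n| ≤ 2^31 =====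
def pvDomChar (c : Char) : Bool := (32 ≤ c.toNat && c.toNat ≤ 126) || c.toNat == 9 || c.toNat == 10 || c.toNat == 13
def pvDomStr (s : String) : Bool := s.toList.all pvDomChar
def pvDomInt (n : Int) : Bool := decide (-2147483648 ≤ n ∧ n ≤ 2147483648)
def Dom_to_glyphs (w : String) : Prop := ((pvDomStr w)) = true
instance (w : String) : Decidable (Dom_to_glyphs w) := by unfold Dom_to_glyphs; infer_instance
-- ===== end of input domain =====

-- B drops the GLYPH_MAP pattern table entirely: it classifies trigraphs by their structural
-- shape and computes each glyph name from character ranks (objective: faster, constant-factor).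

-- ===== PORT A =====
-- GLYPH_MAP, with the string patterns as character lists (Python's slice comparison
-- compares exactly these character sequences, so this is exact).
def glyphMap : List (List Char × String) :=
  [(['c','t','h'], "G1"), (['c','k','h'], "G2"), (['c','p','h'], "G3"), (['c','f','h'], "G4"),
   (['t','c','h'], "G5"), (['k','c','h'], "G6"), (['p','c','h'], "G7"), (['f','c','h'], "G8"),
   (['t','s','h'], "G9"), (['k','s','h'], "GA"), (['p','s','h'], "GB"), (['f','s','h'], "GC"),
   (['c','h'], "C"), (['s','h'], "S"),
   (['i','i'], "I"),
   (['e','e'], "E"),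
   (['a','i'], "A")]

-- A's while loop: i advances by at least 1 each iteration, so fuel = remaining length
-- suffices; the remaining suffix w[i:] is the list argument.  The inner 'for … break' is find?.
def toGlyphsGoA (fuel : Nat) (cs : List Char) : List String :=
  match fuel, cs with
  | 0, _ => []
  | _, [] => []
  | f + 1, c :: rest =>
    match (glyphMap.find? (fun p => (c :: rest).take p.1.length == p.1)) with
    | some (eva, glyph) => glyph :: toGlyphsGoA f ((c :: rest).drop eva.length)
    | none => String.ofList [c] :: toGlyphsGoA f rest

def to_glyphs (w : String) : List String := toGlyphsGoA w.toList.length w.toList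

-- ===== PORT B =====
-- Source B's constants TKPF and HEX, as character lists.
def tkpf : List Char := ['t','k','p','f']
def hexDigits : List Char := ['1','2','3','4','5','6','7','8','9','A','B','C']

-- Source B's while loop, same fuel scheme.  The guards 'i+1 < n' / 'i+2 < n' become the match
-- on the list shape (b exists iff rest ≠ [], w[i+2] exists iff rest has ≥ 2 elements);
-- TKPF.index is PySem.List.index? (in range by the branch's membership guard, so the
-- getD defaults and the HEX indexing getD default are never used on any reachable input);
-- a.upper() is upperChar (exact on ASCII, which the Dom guarantees).
def toGlyphsGoB (fuel : Nat) (cs : List Char) : List String :=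
  match fuel, cs with
  | 0, _ => []
  | _, [] => []
  | f + 1, a :: b :: c2 :: rest =>
    if c2 == 'h' && a == 'c' && tkpf.contains b then
      String.ofList ['G', hexDigits.getD ((PySem.List.index? tkpf b).getD 0) ' ']
        :: toGlyphsGoB f rest
    else if c2 == 'h' && tkpf.contains a && (b == 'c' || b == 's') then
      String.ofList ['G', hexDigits.getD ((PySem.List.index? tkpf a).getD 0 + (if b == 'c' then 4 else 8)) ' ']
        :: toGlyphsGoB f rest
    else if (a == b && (a == 'i' || a == 'e')) || ((a == 'c' || a == 's') && b == 'h') || (a == 'a' && b == 'i') then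
      String.ofList [PySem.Chars.upperChar a] :: toGlyphsGoB f (c2 :: rest)
    else
      String.ofList [a] :: toGlyphsGoB f (b :: c2 :: rest)
  | f + 1, [a, b] =>
    if (a == b && (a == 'i' || a == 'e')) || ((a == 'c' || a == 's') && b == 'h') || (a == 'a' && b == 'i') then
      String.ofList [PySem.Chars.upperChar a] :: toGlyphsGoB f []
    else
      String.ofList [a] :: toGlyphsGoB f [b]
  | f + 1, [a] => String.ofList [a] :: toGlyphsGoB f []

def to_glyphs_alt (w : String) : List String := toGlyphsGoB w.toList.length w.toList

-- ===== PRECONDITION & SPEC =====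
def Spec_to_glyphs (w : String) (out : List String) : Prop := out = to_glyphs_alt w
instance (w : String) (out : List String) : Decidable (Spec_to_glyphs w out) := by unfold Spec_to_glyphs; infer_instance

-- ===== CLAIM (what is proved, stated in full; the proofs are below) =====
def Claim_equal_to_glyphs : Prop := ∀ (w : String), Dom_to_glyphs w → Spec_to_glyphs w (to_glyphs w)

-- ===== LEMMAS AND PROOFS =====

theorem toGlyphsGo_eq (fuel : Nat) (cs : List Char) :
    toGlyphsGoA fuel cs = toGlyphsGoB fuel cs := by
  induction fuel generalizing cs with
  | zero => cases cs <;> rfl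
  | succ f ih =>
    match cs with
    | [] => rfl
    | [a] => simp [toGlyphsGoA, toGlyphsGoB, glyphMap, List.find?, ih]
    | [a, b] =>
      simp only [toGlyphsGoA, toGlyphsGoB, ih]
      split_ifs with h
      · simp only [Bool.and_eq_true, Bool.or_eq_true, beq_iff_eq] at h
        rcases h with (⟨rfl, rfl | rfl⟩ | ⟨rfl | rfl, rfl⟩) | ⟨rfl, rfl⟩ <;> rfl
      · simp only [Bool.and_eq_true, Bool.or_eq_true, beq_iff_eq, not_or, not_and] at h
        have hnone : glyphMap.find? (fun p => (List.take p.1.length [a, b]) == p.1) = none :=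
          List.find?_eq_none.mpr (by
            intro p hp; fin_cases hp <;> simp <;> intros <;> subst_vars <;> simp_all <;> exact fun hh => by simp_all)
        rw [hnone]
    | a :: b :: c2 :: t =>
      simp only [toGlyphsGoA, toGlyphsGoB, ih]
      split_ifs with h1 h2 hbc h3
      · simp [tkpf] at h1
        obtain ⟨⟨rfl, rfl⟩, rfl | rfl | rfl | rfl⟩ := h1 <;> rfl
      · -- h2 pos, inner (b == 'c') pos
        simp [tkpf] at h2 hbc
        obtain ⟨⟨rfl, rfl | rfl | rfl | rfl⟩, _⟩ := h2 <;> subst hbc <;> rfl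
      · -- h2 pos, inner (b == 'c') neg, so b = 's'
        simp [tkpf] at h2 hbc
        obtain ⟨⟨rfl, rfl | rfl | rfl | rfl⟩, rfl | rfl⟩ := h2 <;> first | rfl | exact absurd rfl hbc
      · simp only [Bool.and_eq_true, Bool.or_eq_true, beq_iff_eq] at h3
        rcases h3 with (⟨rfl, rfl | rfl⟩ | ⟨rfl | rfl, rfl⟩) | ⟨rfl, rfl⟩ <;> rfl
      · simp only [Bool.and_eq_true, Bool.or_eq_true, beq_iff_eq, not_or, not_and, tkpf,
          List.contains_eq_mem, List.mem_cons, List.not_mem_nil, or_false, decide_eq_true_eq] at h1 h2 h3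
        have hnone : glyphMap.find? (fun p => (List.take p.1.length (a :: b :: c2 :: t)) == p.1) = none :=
          List.find?_eq_none.mpr (by
            intro p hp; fin_cases hp <;> simp <;> intros <;> subst_vars <;> simp_all <;> exact fun hh => by simp_all)
        rw [hnone]

-- ===== VERDICT (by name: the statement is the Claim_ definition above) =====
theorem to_glyphs_spec : Claim_equal_to_glyphs := by
  intro w _
  unfold Spec_to_glyphs to_glyphs to_glyphs_alt
  exact toGlyphsGo_eq _ _
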